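-- pv_equiv track=rewrite | github.com/darthsuogles/phissenschaft | algo/sum_in_range.py | sumInRangeBruteForce
-- ===== SOURCE A (Python) =====
-- def sumInRangeBruteForce(nums, queries):
--     ''' Compute a weight, this is slow for large queries
--     '''
--     if not nums: return 0
--     n = len(nums)
--     idx_weight = [0] * n
--     for q in queries:
--         i, j = q
--         while i <= j:
--             idx_weight[i] += 1
--             i += 1
--
--     tot_sum = 0
--     mod = int(1e9 + 7)
--     for i, a in enumerate(nums):
--         wt = idx_weight[i]
--         if wt > 0:
--             tot_sum += (a * wt) % mod
--
--     return tot_sum % mod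
-- ===== SOURCE B (Python) =====
-- def sumInRangeBruteForce(nums, queries):
--     '''Difference array: mark range endpoints, prefix-sum into weights in one pass.'''
--     if not nums:
--         return 0
--     n = len(nums)
--     mod = 10 ** 9 + 7
--     diff = [0] * (n + 1)
--     for i, j in queries:
--         if 0 <= i <= j < n:
--             diff[i] += 1
--             diff[j + 1] -= 1
--     tot = 0
--     wt = 0
--     for a, d in zip(nums, diff):
--         wt += d
--         tot += (a * wt) % mod
--     return tot % mod
-- ===== Notes on version B (the rewrite author's own statement) =====
-- stated objective: alternative
-- what changed: Replaces A's per-query element-by-element range increment loop by a difference array: each query only marks its two endpoints and one prefix-sum pass over nums accumulates the weights (O(n+q) vs O(n + total range length); not measurably faster on the probe's inputs).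
-- outside the precondition, e.g. on sumInRangeBruteForce([1, 2, 3], [(-1, 2)]): A returns 9, B returns 0
import Mathlib
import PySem

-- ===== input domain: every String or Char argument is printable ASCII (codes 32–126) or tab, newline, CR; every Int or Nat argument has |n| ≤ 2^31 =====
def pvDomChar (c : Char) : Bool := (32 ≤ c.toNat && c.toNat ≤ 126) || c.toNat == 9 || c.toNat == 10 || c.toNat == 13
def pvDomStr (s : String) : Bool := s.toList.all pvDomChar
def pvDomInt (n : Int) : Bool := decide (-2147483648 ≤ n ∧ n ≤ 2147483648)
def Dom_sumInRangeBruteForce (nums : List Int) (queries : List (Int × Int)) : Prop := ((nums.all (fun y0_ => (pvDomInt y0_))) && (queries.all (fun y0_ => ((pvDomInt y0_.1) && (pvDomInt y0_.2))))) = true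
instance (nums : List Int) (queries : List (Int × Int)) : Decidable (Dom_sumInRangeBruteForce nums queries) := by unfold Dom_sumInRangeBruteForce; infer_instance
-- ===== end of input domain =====

-- B replaces A's per-element range increments by a difference array: queries mark endpoints, one prefix-sum pass accumulates the weights (alternative algorithm; return value proved equal on Pre_).

-- ===== PORT A =====
-- inner 'while i <= j: idx_weight[i] += 1; i += 1' (negative i wraps via pySetD/pyGetD)
def pvWhileA (w : List Int) (i j : Int) : List Int :=
  if i ≤ j then pvWhileA (PySem.List.pySetD w i (PySem.List.pyGetD w i 0 + 1)) (i + 1) j else w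
termination_by (j + 1 - i).toNat
decreasing_by omega

def sumInRangeBruteForce (nums : List Int) (queries : List (Int × Int)) : Int :=
  if nums = [] then 0
  else
    let n := nums.length
    let w := queries.foldl (fun w q => pvWhileA w q.1 q.2) (List.replicate n 0)
    let tot := (PySem.List.enumerate nums 0).foldl (fun t p =>
      let wt := PySem.List.pyGetD w p.1 0
      if wt > 0 then t + PySem.Int.mod (p.2 * wt) 1000000007 else t) 0
    PySem.Int.mod tot 1000000007

-- ===== PORT B =====
-- body of B's query loop: 'if 0 <= i <= j < n: diff[i] += 1; diff[j+1] -= 1'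
def pvStepB (n : Nat) (d : List Int) (q : Int × Int) : List Int :=
  if 0 ≤ q.1 ∧ q.1 ≤ q.2 ∧ q.2 < (n : Int) then
    let d1 := d.set q.1.toNat (d.getD q.1.toNat 0 + 1)
    d1.set (q.2 + 1).toNat (d1.getD (q.2 + 1).toNat 0 - 1)
  else d

def sumInRangeBruteForce_alt (nums : List Int) (queries : List (Int × Int)) : Int :=
  if nums = [] then 0
  else
    let n := nums.length
    let diff := queries.foldl (pvStepB n) (List.replicate (n + 1) (0 : Int))
    let r := (nums.zip diff).foldl (fun (st : Int × Int) p =>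
      let wt := st.1 + p.2
      (wt, st.2 + PySem.Int.mod (p.1 * wt) 1000000007)) (0, 0)
    PySem.Int.mod r.2 1000000007

-- ===== PRECONDITION & SPEC =====
-- Pre_ excludes (for nonempty nums) queries with i ≤ j whose range leaves [0, n): j ≥ n or i < -n make A raise IndexError, and a
-- negative start -n ≤ i < 0 hits Python's accidental negative-index wraparound, where A's and B's values are equally accidental.
def Pre_sumInRangeBruteForce (nums : List Int) (queries : List (Int × Int)) : Prop :=
  nums = [] ∨ ∀ q ∈ queries, q.1 ≤ q.2 → 0 ≤ q.1 ∧ q.2 < (nums.length : Int)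
instance (nums : List Int) (queries : List (Int × Int)) : Decidable (Pre_sumInRangeBruteForce nums queries) := by unfold Pre_sumInRangeBruteForce; infer_instance

def pvWitness_sumInRangeBruteForce : List Int × (List (Int × Int)) := ([1, 2, 3], [(0, 1), (2, 2), (3, 1)])

def Spec_sumInRangeBruteForce (nums : List Int) (queries : List (Int × Int)) (out : Int) : Prop := out = sumInRangeBruteForce_alt nums queries
instance (nums : List Int) (queries : List (Int × Int)) (out : Int) : Decidable (Spec_sumInRangeBruteForce nums queries out) := by unfold Spec_sumInRangeBruteForce; infer_instance

-- ===== CLAIM (what is proved, stated in full; the proofs are below) =====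
def Claim_equal_sumInRangeBruteForce : Prop := ∀ (nums : List Int) (queries : List (Int × Int)), Dom_sumInRangeBruteForce nums queries → Pre_sumInRangeBruteForce nums queries → Spec_sumInRangeBruteForce nums queries (sumInRangeBruteForce nums queries)

-- ===== LEMMAS AND PROOFS =====

-- number of queries covering index k
def pvCov : List (Int × Int) → Int → Int
  | [], _ => 0
  | q :: qs, k => (if q.1 ≤ k ∧ k ≤ q.2 then 1 else 0) + pvCov qs k

lemma pvCov_nonneg (qs : List (Int × Int)) (k : Int) : 0 ≤ pvCov qs k := by
  induction qs with
  | nil => simp [pvCov]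
  | cons q qs ih => simp only [pvCov]; split_ifs <;> omega

lemma length_pvWhileA (w : List Int) (i j : Int) : (pvWhileA w i j).length = w.length := by
  fun_induction pvWhileA w i j with
  | case1 w i h ih => rw [ih, PySem.List.length_pySetD]
  | case2 => rfl

lemma getD_pvWhileA (w : List Int) (i j : Int) :
    ∀ (k : Nat), 0 ≤ i → j < (w.length : Int) →
    (pvWhileA w i j).getD k 0 = w.getD k 0 + (if i ≤ (k : Int) ∧ (k : Int) ≤ j then 1 else 0) := by
  fun_induction pvWhileA w i j with
  | case1 w i h ih =>
      intro k h0i hj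
      have hilen : i < (w.length : Int) := lt_of_le_of_lt h hj
      rw [PySem.List.pySetD_of_nonneg w _ h0i, PySem.List.pyGetD_eq_getElem w _ h0i hilen] at ih ⊢
      rw [ih k (by omega) (by simpa using hj)]
      by_cases hk : k = i.toNat
      · subst hk
        have h1 : i.toNat < w.length := by omega
        have h2 : ((i.toNat : Nat) : Int) = i := by omega
        have hs : (w.set i.toNat (w[i.toNat] + 1)).getD i.toNat 0 = w[i.toNat] + 1 := by
          simp [List.getD, h1]
        rw [hs, List.getD_eq_getElem w 0 h1]
        split_ifs <;> omega
      · have hs : (w.set i.toNat (w[i.toNat]'(by omega) + 1)).getD k 0 = w.getD k 0 := by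
          simp [List.getD, Ne.symm hk]
        rw [hs]
        have hne : ¬ ((k : Int) = i) := by omega
        split_ifs <;> omega
  | case2 w i h =>
      intro k h0i hj
      have : ¬ (i ≤ (k : Int) ∧ (k : Int) ≤ j) := by omega
      simp [this]

lemma getD_foldA (qs : List (Int × Int)) (w : List Int) (k : Nat)
    (hpre : ∀ q ∈ qs, q.1 ≤ q.2 → 0 ≤ q.1 ∧ q.2 < (w.length : Int)) :
    (qs.foldl (fun w q => pvWhileA w q.1 q.2) w).getD k 0 = w.getD k 0 + pvCov qs ((k : Int)) := by
  induction qs generalizing w with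
  | nil => simp [pvCov]
  | cons q qs ih =>
      simp only [List.foldl_cons, pvCov]
      by_cases hq : q.1 ≤ q.2
      · obtain ⟨h0, h1⟩ := hpre q (by simp) hq
        rw [ih _ (fun q' hq' => by
              rw [length_pvWhileA]; exact hpre q' (by simp [hq']) )]
        rw [getD_pvWhileA w q.1 q.2 k h0 h1]
        ring
      · have hw : pvWhileA w q.1 q.2 = w := by rw [pvWhileA]; simp [hq]
        rw [hw, ih _ (fun q' hq' => hpre q' (by simp [hq']))]
        have : ¬ (q.1 ≤ (k : Int) ∧ (k : Int) ≤ q.2) := by omega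
        simp [this]

lemma sum_take_set (d : List Int) (i : Nat) (v : Int) (m : Nat) (hi : i < d.length) :
    (((d.set i v).take m).sum) = ((d.take m).sum) + (if i < m then v - d.getD i 0 else 0) := by
  induction d generalizing i m with
  | nil => simp at hi
  | cons x d ih =>
      cases m with
      | zero => simp
      | succ m =>
          cases i with
          | zero => simp [List.getD]; ring
          | succ i =>
              simp only [List.set_cons_succ, List.take_succ_cons, List.sum_cons]
              rw [ih i m (by simpa using hi)]
              simp only [List.getD, List.getElem?_cons_succ]
              split_ifs with h1 h2 h2 <;> omega

lemma sum_take_foldB (qs : List (Int × Int)) (d : List Int) (n : Nat) (k : Nat)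
    (hd : d.length = n + 1)
    (hpre : ∀ q ∈ qs, q.1 ≤ q.2 → 0 ≤ q.1 ∧ q.2 < (n : Int)) :
    ((qs.foldl (pvStepB n) d).take (k + 1)).sum = ((d.take (k + 1)).sum) + pvCov qs ((k : Int)) := by
  induction qs generalizing d with
  | nil => simp [pvCov]
  | cons q qs ih =>
      simp only [List.foldl_cons, pvCov]
      by_cases hg : 0 ≤ q.1 ∧ q.1 ≤ q.2 ∧ q.2 < (n : Int)
      · rw [show pvStepB n d q = (d.set q.1.toNat (d.getD q.1.toNat 0 + 1)).set (q.2 + 1).toNat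
              ((d.set q.1.toNat (d.getD q.1.toNat 0 + 1)).getD (q.2 + 1).toNat 0 - 1) by
            unfold pvStepB; rw [if_pos hg]]
        have ha : q.1.toNat < d.length := by omega
        have hb : (q.2 + 1).toNat < (d.set q.1.toNat (d.getD q.1.toNat 0 + 1)).length := by
          simp [List.length_set]; omega
        rw [ih _ (by simp [List.length_set, hd]) (fun q' hq' => hpre q' (by simp [hq']))]
        rw [sum_take_set _ _ _ _ hb, sum_take_set _ _ _ _ ha]
        have hca : (q.1.toNat : Int) = q.1 := by omega
        have hcb : ((q.2 + 1).toNat : Int) = q.2 + 1 := by omega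
        split_ifs <;> omega
      · rw [show pvStepB n d q = d by unfold pvStepB; rw [if_neg hg]]
        rw [ih _ hd (fun q' hq' => hpre q' (by simp [hq']))]
        have hq2 : ¬ q.1 ≤ q.2 := fun hc => hg ⟨(hpre q (by simp) hc).1, hc, (hpre q (by simp) hc).2⟩
        have : ¬ (q.1 ≤ (k : Int) ∧ (k : Int) ≤ q.2) := by omega
        simp [this]

lemma length_foldB (qs : List (Int × Int)) (d : List Int) (n : Nat) :
    ((qs.foldl (pvStepB n) d)).length = d.length := by
  induction qs generalizing d with
  | nil => rfl
  | cons q qs ih =>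
      simp only [List.foldl_cons]; rw [ih]; unfold pvStepB; split_ifs <;> simp

-- reference sum, A-shaped: Σ mod (a * w[s+k]) M
def pvRefS (w : List Int) : List Int → Nat → Int
  | [], _ => 0
  | a :: xs, s => PySem.Int.mod (a * w.getD s 0) 1000000007 + pvRefS w xs (s + 1)

-- reference sum, B-shaped: running prefix weight
def pvRefB : List Int → List Int → Int → Int
  | [], _, _ => 0
  | _ :: _, [], _ => 0
  | a :: xs, d :: ds, wt => PySem.Int.mod (a * (wt + d)) 1000000007 + pvRefB xs ds (wt + d)

lemma foldA_enum (w : List Int) (hw : ∀ k : Nat, 0 ≤ w.getD k 0) :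
    ∀ (xs : List Int) (s : Nat) (t : Int),
    ((PySem.List.enumerate xs (s : Int)).foldl (fun t p =>
      let wt := PySem.List.pyGetD w p.1 0
      if wt > 0 then t + PySem.Int.mod (p.2 * wt) 1000000007 else t) t) = t + pvRefS w xs s := by
  intro xs
  induction xs with
  | nil => intro s t; simp [pvRefS, PySem.List.enumerate]
  | cons a xs ih =>
      intro s t
      rw [PySem.List.enumerate_cons]
      simp only [List.foldl_cons]
      have hcast : ((s : Int) + 1) = ((s + 1 : Nat) : Int) := by push_cast; ring
      rw [hcast, ih (s + 1)]
      simp only [pvRefS, PySem.List.pyGetD_natCast]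
      have hnn := hw s
      by_cases hpos : w.getD s 0 > 0
      · rw [if_pos hpos]; ring
      · have hz : w.getD s 0 = 0 := by omega
        rw [if_neg hpos, hz]
        have : PySem.Int.mod (a * 0) 1000000007 = 0 := by
          rw [PySem.Int.mod_eq_emod_of_pos (by norm_num)]; simp
        rw [this]; ring

lemma foldB_zip : ∀ (xs ds : List Int) (wt t : Int),
    ((xs.zip ds).foldl (fun (st : Int × Int) p =>
      let w' := st.1 + p.2
      (w', st.2 + PySem.Int.mod (p.1 * w') 1000000007)) (wt, t)).2 = t + pvRefB xs ds wt := by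
  intro xs
  induction xs with
  | nil => intro ds wt t; simp [pvRefB]
  | cons a xs ih =>
      intro ds wt t
      cases ds with
      | nil => simp [pvRefB]
      | cons d ds =>
          simp only [List.zip_cons_cons, List.foldl_cons]
          rw [ih ds (wt + d)]
          simp only [pvRefB]; ring

lemma ref_eq (w : List Int) : ∀ (xs ds : List Int) (s : Nat) (wt : Int),
    (∀ k : Nat, k < xs.length → wt + ((ds.take (k + 1)).sum) = w.getD (s + k) 0) →
    xs.length ≤ ds.length →
    pvRefS w xs s = pvRefB xs ds wt := by
  intro xs
  induction xs with
  | nil => intro ds s wt _ _; simp [pvRefS, pvRefB]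
  | cons a xs ih =>
      intro ds s wt hrel hlen
      cases ds with
      | nil => simp at hlen
      | cons d ds =>
          simp only [pvRefS, pvRefB]
          have h0 := hrel 0 (by simp)
          simp only [List.take_succ_cons, List.take_zero, List.sum_cons, List.sum_nil] at h0
          have hd : wt + d = w.getD s 0 := by simpa using h0
          have hshift : ∀ k < xs.length, (wt + d) + ((ds.take (k + 1)).sum) = w.getD (s + 1 + k) 0 := by
            intro k hk
            have hk1 := hrel (k + 1) (by simpa using Nat.succ_lt_succ hk)
            simp only [List.take_succ_cons, List.sum_cons] at hk1
            have he : s + 1 + k = s + (k + 1) := by omega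
            rw [he]; omega
          have hrec := ih ds (s + 1) (wt + d) hshift (by simpa using hlen)
          rw [hrec, ← hd]

lemma pvMain (nums : List Int) (queries : List (Int × Int))
    (hpre' : ∀ q ∈ queries, q.1 ≤ q.2 → 0 ≤ q.1 ∧ q.2 < (nums.length : Int)) :
    PySem.Int.mod ((PySem.List.enumerate nums (0 : Int)).foldl (fun t p =>
        let wt := PySem.List.pyGetD (queries.foldl (fun w q => pvWhileA w q.1 q.2)
          (List.replicate nums.length (0 : Int))) p.1 0
        if wt > 0 then t + PySem.Int.mod (p.2 * wt) 1000000007 else t) 0) 1000000007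
    = PySem.Int.mod (((nums.zip (queries.foldl (pvStepB nums.length)
        (List.replicate (nums.length + 1) (0 : Int)))).foldl (fun (st : Int × Int) p =>
        let wt := st.1 + p.2
        (wt, st.2 + PySem.Int.mod (p.1 * wt) 1000000007)) ((0 : Int), (0 : Int))).2) 1000000007 := by
  set n := nums.length with hn
  set W := queries.foldl (fun w q => pvWhileA w q.1 q.2) (List.replicate n (0 : Int)) with hWdef
  set diff := queries.foldl (pvStepB n) (List.replicate (n + 1) (0 : Int)) with hDdef
  have hW : ∀ k : Nat, W.getD k 0 = pvCov queries ((k : Int)) := by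
    intro k
    rw [hWdef, getD_foldA queries _ k (by simpa using hpre')]
    simp
  have hWnn : ∀ k : Nat, 0 ≤ W.getD k 0 := fun k => by rw [hW]; exact pvCov_nonneg _ _
  have hDlen : diff.length = n + 1 := by rw [hDdef, length_foldB]; simp
  have hDsum : ∀ k : Nat, k < n → ((diff.take (k + 1)).sum) = pvCov queries ((k : Int)) := by
    intro k hk
    rw [hDdef, sum_take_foldB queries _ n k (by simp) hpre']
    have : ((List.replicate (n + 1) (0 : Int)).take (k + 1)).sum = 0 := by
      simp [List.take_replicate]
    rw [this]; ring
  have hA := foldA_enum W hWnn nums 0 0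
  simp only [Nat.cast_zero, zero_add] at hA
  rw [hA]
  have hB := foldB_zip nums diff 0 0
  simp only [zero_add] at hB
  rw [hB]
  have href : pvRefS W nums 0 = pvRefB nums diff 0 := by
    apply ref_eq W nums diff 0 0
    · intro k hk
      rw [hDsum k (by omega), hW, Nat.zero_add]
      ring
    · omega
  rw [href]

-- ===== VERDICT (by name: the statement is the Claim_ definition above) =====
theorem sumInRangeBruteForce_spec : Claim_equal_sumInRangeBruteForce := by
  intro nums queries _ hpre
  unfold Spec_sumInRangeBruteForce
  by_cases hnil : nums = []
  · simp [sumInRangeBruteForce, sumInRangeBruteForce_alt, hnil]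
  · have hpre' : ∀ q ∈ queries, q.1 ≤ q.2 → 0 ≤ q.1 ∧ q.2 < (nums.length : Int) := by
      rcases hpre with h | h
      · exact absurd h hnil
      · exact h
    rw [sumInRangeBruteForce, sumInRangeBruteForce_alt, if_neg hnil, if_neg hnil]
    exact pvMain nums queries hpre'
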